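-- pv_equiv track=rewrite | github.com/dougchartier/Python-Projects | connectfour.py | max_num_player_symbols
-- ===== SOURCE A (Python) =====
-- BOARD_WIDTH = 7
--
-- BOARD_HEIGHT = 6
--
-- def board_xy_to_ind(row,col, width = BOARD_WIDTH, height = BOARD_HEIGHT):
--     """ Convert (row,col) on board to index into the board array.  Coordinates start in upper-left hand
--         corner of the board.
--
--             row = row of the board (starting at 0)
--             col = column of the board (starting at 0)
--
--         Returns index into board array if (row,col) are valid, and -1 if (row,col) is invalid.
--     """
--     if row < 0 or row >= BOARD_HEIGHT or col < 0 or col >= BOARD_WIDTH: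
--         # Invalid coordinates.
--         return -1
--
--     return row * width + col
--
-- def max_num_player_symbols(start_row, start_col, row_stride, col_stride, player,board, width=BOARD_WIDTH, height=BOARD_HEIGHT):
--     """ Starting at (start_row,start_col), check for the maximum number of consecutive symbols in a certain path
--         of board entries around (start_row,start_col).  In particular, look within a "radius" of three slots from
--         (start_row,start_col).  row_stride and col_stride determine the orientation of the path around (start_row,
--         start_col).  For example, row_stride = -1 and col_stride = 1 results in a path up to and the right,
--         beginning at (start_row + 3, start_col - 3).
--
--             start_row = starting row
--             start_col = starting column
--             row_stride = change to the row index at each iteration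
--             col-stride = change to the col index at each iteration
--             player = player whose pieces should be checked (1 or 2)
--             board = the board array
--
--         Returns a non-negative integer equal to the maximum number of consecutive player symbols encountered on
--         the indicated path.
--     """
--     max_syms = 0
--     cur_count = 0
--
--     # Start the location a vertical distance of -3 * row_stride and a horizontal distance -3 * rowstride from
--     # the position (start_row,start_col).
--     row = start_row - row_stride * 3
--     col = start_col - col_stride * 3
--
--     # Check the seven consecutive board spaces starting at the starting position and moving by col_stride columns and
--     # row_stride rows at end iteration.  Keep track of the maximum number of symbols in a row you encounter.
--     for i in range(0,8):
--         ind = board_xy_to_ind(row,col,width,height)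
--         if ind != -1:
--             # Valid board coordinate.
--             if board[ind] == player:
--                 # Another consecutive piece from this player.
--                 cur_count = cur_count + 1
--                 if cur_count > max_syms:
--                     # A new record!  Update the max_syms count.
--                     max_syms = cur_count
--             else:
--                 # This slot is not taken up by the player's piece.  Reset the current symbol count.
--                 cur_count = 0
--
--         # Stride to the next board slot on the path.
--         row = row + row_stride
--         col = col + col_stride
--     return max_syms
-- ===== SOURCE B (Python) =====
-- BOARD_WIDTH = 7
--
-- BOARD_HEIGHT = 6
--
-- def board_xy_to_ind(row, col, width=BOARD_WIDTH, height=BOARD_HEIGHT):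
--     if row < 0 or row >= BOARD_HEIGHT or col < 0 or col >= BOARD_WIDTH:
--         return -1
--     return row * width + col
--
-- def _max_run(vals, player):
--     # longest run of `player` = length of the player-prefix, vs. best run after it
--     if not vals:
--         return 0
--     n = 0
--     while n < len(vals) and vals[n] == player:
--         n += 1
--     return max(n, _max_run(vals[n + 1:], player))
--
-- def max_num_player_symbols(start_row, start_col, row_stride, col_stride, player, board, width=BOARD_WIDTH, height=BOARD_HEIGHT):
--     # Phase 1: board values along the 8-step path, off-board positions dropped.
--     inds = [board_xy_to_ind(start_row + (i - 3) * row_stride,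
--                             start_col + (i - 3) * col_stride,
--                             width, height) for i in range(8)]
--     vals = [board[ind] for ind in inds if ind != -1]
--     # Phase 2: longest run of `player` in that list.
--     return _max_run(vals, player)
-- ===== Notes on version B (the rewrite author's own statement) =====
-- stated objective: alternative
-- what changed: A's single fused scan carrying (max,current,row,col) state is split into two phases: collect the on-board values along the 8-step path (positions in closed form, off-board slots dropped), then a run-length recursion that takes the player-prefix length and recurses past the first non-player entry.
import Mathlib
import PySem

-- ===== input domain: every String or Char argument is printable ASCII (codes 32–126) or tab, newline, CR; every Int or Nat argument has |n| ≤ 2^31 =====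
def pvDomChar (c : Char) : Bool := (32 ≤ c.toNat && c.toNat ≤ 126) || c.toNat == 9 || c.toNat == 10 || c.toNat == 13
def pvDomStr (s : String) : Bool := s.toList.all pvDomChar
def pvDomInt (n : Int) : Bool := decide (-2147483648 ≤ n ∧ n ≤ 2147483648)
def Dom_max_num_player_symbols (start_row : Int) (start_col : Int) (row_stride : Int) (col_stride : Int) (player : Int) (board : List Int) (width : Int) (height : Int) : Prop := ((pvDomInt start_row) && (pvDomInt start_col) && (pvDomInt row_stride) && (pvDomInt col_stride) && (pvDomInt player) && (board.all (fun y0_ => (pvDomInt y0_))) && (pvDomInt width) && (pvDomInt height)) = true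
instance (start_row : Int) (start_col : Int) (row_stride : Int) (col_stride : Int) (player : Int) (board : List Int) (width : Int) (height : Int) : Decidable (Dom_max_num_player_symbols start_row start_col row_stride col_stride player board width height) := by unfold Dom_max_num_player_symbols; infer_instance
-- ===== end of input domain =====

-- ===== PORT A =====
-- B separates A's fused stateful scan into two phases: collect the on-board values along the path, then a run-length recursion (alternative decomposition; same cost).
-- A-side helper: port of the module helper board_xy_to_ind (shared by both ports, as in the Python module).
def board_xy_to_ind (row : Int) (col : Int) (width : Int) (_height : Int) : Int :=
  if row < 0 ∨ row ≥ 6 ∨ col < 0 ∨ col ≥ 7 then -1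
  else row * width + col

-- the body of A's for-loop, as a step function over the state (max_syms, cur_count, row, col)
def pvStepA (player : Int) (board : List Int) (width : Int) (height : Int)
    (row_stride : Int) (col_stride : Int)
    (st : Int × Int × Int × Int) (_i : Int) : Int × Int × Int × Int :=
  let ind := board_xy_to_ind st.2.2.1 st.2.2.2 width height
  let p : Int × Int :=
    if ind ≠ -1 then
      if PySem.List.pyGetD board ind 0 = player then
        let cur_count := st.2.1 + 1
        (if cur_count > st.1 then cur_count else st.1, cur_count)
      else (st.1, 0)
    else (st.1, st.2.1)
  (p.1, p.2, st.2.2.1 + row_stride, st.2.2.2 + col_stride)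

def max_num_player_symbols (start_row : Int) (start_col : Int) (row_stride : Int) (col_stride : Int) (player : Int) (board : List Int) (width : Int) (height : Int) : Int :=
  ((PySem.List.pyRange 0 8 1).foldl (pvStepA player board width height row_stride col_stride)
    (0, 0, start_row - row_stride * 3, start_col - col_stride * 3)).1

-- ===== PORT B =====
-- B-side helper: n = length of the player-prefix (the while loop), answer = max of n and the best run after the first non-player entry.
def pvPrefRun (player : Int) : List Int → Nat
  | [] => 0
  | v :: rest => if v = player then pvPrefRun player rest + 1 else 0

def pvMaxRun (vals : List Int) (player : Int) : Int :=
  if vals = [] then 0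
  else
    max ((pvPrefRun player vals : Int))
      (pvMaxRun (vals.drop (pvPrefRun player vals + 1)) player)
termination_by vals.length
decreasing_by
  rename_i h
  have : 0 < vals.length := List.length_pos_iff.mpr h
  simp only [List.length_drop]; omega

def max_num_player_symbols_alt (start_row : Int) (start_col : Int) (row_stride : Int) (col_stride : Int) (player : Int) (board : List Int) (width : Int) (height : Int) : Int :=
  let inds := (PySem.List.pyRange 0 8 1).map (fun i =>
    board_xy_to_ind (start_row + (i - 3) * row_stride) (start_col + (i - 3) * col_stride) width height)
  let vals := inds.filterMap (fun ind =>
    if ind ≠ -1 then some (PySem.List.pyGetD board ind 0) else none)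
  pvMaxRun vals player

-- ===== PRECONDITION & SPEC =====
-- Pre_ excludes exactly the inputs on which Python A raises IndexError: some step of the
-- path lands on a valid coordinate whose computed index ind ≠ -1 lies outside board's range.
def Pre_max_num_player_symbols (start_row : Int) (start_col : Int) (row_stride : Int) (col_stride : Int) (player : Int) (board : List Int) (width : Int) (height : Int) : Prop :=
  ∀ i ∈ PySem.List.pyRange 0 8 1,
    let r := start_row + (i - 3) * row_stride
    let c := start_col + (i - 3) * col_stride
    (0 ≤ r ∧ r < 6 ∧ 0 ≤ c ∧ c < 7 ∧ r * width + c ≠ -1) →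
      PySem.Raise.InRange board.length (r * width + c)
instance (start_row : Int) (start_col : Int) (row_stride : Int) (col_stride : Int) (player : Int) (board : List Int) (width : Int) (height : Int) : Decidable (Pre_max_num_player_symbols start_row start_col row_stride col_stride player board width height) := by unfold Pre_max_num_player_symbols; infer_instance

def pvWitness_max_num_player_symbols : Int × Int × Int × Int × Int × List Int × Int × Int :=
  (0, 0, 0, 0, 1, [1], 7, 6)

def Spec_max_num_player_symbols (start_row : Int) (start_col : Int) (row_stride : Int) (col_stride : Int) (player : Int) (board : List Int) (width : Int) (height : Int) (out : Int) : Prop := out = max_num_player_symbols_alt start_row start_col row_stride col_stride player board width height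
instance (start_row : Int) (start_col : Int) (row_stride : Int) (col_stride : Int) (player : Int) (board : List Int) (width : Int) (height : Int) (out : Int) : Decidable (Spec_max_num_player_symbols start_row start_col row_stride col_stride player board width height out) := by unfold Spec_max_num_player_symbols; infer_instance

-- ===== CLAIM (what is proved, stated in full; the proofs are below) =====
def Claim_equal_max_num_player_symbols : Prop := ∀ (start_row : Int) (start_col : Int) (row_stride : Int) (col_stride : Int) (player : Int) (board : List Int) (width : Int) (height : Int), Dom_max_num_player_symbols start_row start_col row_stride col_stride player board width height → Pre_max_num_player_symbols start_row start_col row_stride col_stride player board width height → Spec_max_num_player_symbols start_row start_col row_stride col_stride player board width height (max_num_player_symbols start_row start_col row_stride col_stride player board width height)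

-- ===== LEMMAS AND PROOFS =====

-- one path cell: `some value` on a usable slot, `none` where A's loop skips
def pvCellAt (board : List Int) (width : Int) (height : Int) (row : Int) (col : Int) : Option Int :=
  let ind := board_xy_to_ind row col width height
  if ind ≠ -1 then some (PySem.List.pyGetD board ind 0) else none

-- the cells A's loop visits, positions tracked incrementally as in A
def pvCells (board : List Int) (width : Int) (height : Int) (rs : Int) (cs : Int) : List Int → Int → Int → List (Option Int)
  | [], _, _ => []
  | _ :: rest, row, col =>
      pvCellAt board width height row col :: pvCells board width height rs cs rest (row + rs) (col + cs)

-- A's fused scan, abstracted over the cell list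
def pvFuse (player : Int) : List (Option Int) → Int → Int → Int
  | [], m, _ => m
  | none :: rest, m, c => pvFuse player rest m c
  | some v :: rest, m, c =>
      if v = player then pvFuse player rest (if c + 1 > m then c + 1 else m) (c + 1)
      else pvFuse player rest m 0

-- best run in the remainder, with the current run seeded at c
def pvG (player : Int) : List Int → Int → Int
  | [], c => c
  | v :: rest, c => if v = player then pvG player rest (c + 1) else max c (pvG player rest 0)

theorem pvFoldA_eq (player : Int) (board : List Int) (width height rs cs : Int) :
    ∀ (l : List Int) (m c row col : Int),
      (l.foldl (pvStepA player board width height rs cs) (m, c, row, col)).1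
        = pvFuse player (pvCells board width height rs cs l row col) m c := by
  intro l
  induction l with
  | nil => intro m c row col; simp [pvCells, pvFuse]
  | cons x xs ih =>
    intro m c row col
    simp only [List.foldl_cons, pvCells]
    by_cases h : board_xy_to_ind row col width height ≠ -1
    · by_cases hv : PySem.List.pyGetD board (board_xy_to_ind row col width height) 0 = player
      · simp [pvStepA, pvCellAt, h, hv, pvFuse, ih]
      · simp [pvStepA, pvCellAt, h, hv, pvFuse, ih]
    · simp [pvStepA, pvCellAt, h, pvFuse, ih]

theorem pvG_ge (player : Int) : ∀ (l : List Int) (c : Int), c ≤ pvG player l c := by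
  intro l
  induction l with
  | nil => intro c; simp [pvG]
  | cons v rest ih =>
    intro c
    by_cases hv : v = player
    · simp only [pvG, if_pos hv]
      exact le_trans (by omega) (ih (c + 1))
    · simp only [pvG, if_neg hv]
      exact le_max_left _ _

theorem pvFuse_eq_G (player : Int) :
    ∀ (os : List (Option Int)) (m c : Int), 0 ≤ c → c ≤ m →
      pvFuse player os m c = max m (pvG player (os.filterMap id) c) := by
  intro os
  induction os with
  | nil => intro m c _ hcm; simp [pvFuse, pvG]; omega
  | cons o rest ih =>
    intro m c hc hcm
    match o with
    | none =>
      have hfm : List.filterMap id (none :: rest) = List.filterMap id rest := by simp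
      rw [hfm]
      simpa [pvFuse] using ih m c hc hcm
    | some v =>
      have hfm : List.filterMap id (some v :: rest) = v :: List.filterMap id rest := by simp
      rw [hfm]
      by_cases hv : v = player
      · have h1 : pvFuse player rest (if c + 1 > m then c + 1 else m) (c + 1)
            = max (max m (c + 1)) (pvG player (rest.filterMap id) (c + 1)) := by
          have : (if c + 1 > m then c + 1 else m) = max m (c + 1) := by omega
          rw [this]
          exact ih (max m (c + 1)) (c + 1) (by omega) (le_max_right m (c + 1))
        have h2 : c + 1 ≤ pvG player (rest.filterMap id) (c + 1) := pvG_ge player _ _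
        rw [show pvFuse player (some v :: rest) m c
              = pvFuse player rest (if c + 1 > m then c + 1 else m) (c + 1) from by
            simp [pvFuse, hv],
          show pvG player (v :: List.filterMap id rest) c
              = pvG player (List.filterMap id rest) (c + 1) from by simp [pvG, hv]]
        rw [h1, max_assoc, max_eq_right h2]
      · rw [show pvFuse player (some v :: rest) m c = pvFuse player rest m 0 from by
            simp [pvFuse, hv],
          show pvG player (v :: List.filterMap id rest) c
              = max c (pvG player (List.filterMap id rest) 0) from by simp [pvG, hv]]
        rw [ih m 0 le_rfl (by omega), ← max_assoc, max_eq_left hcm]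

theorem pvG_eq_maxRun (player : Int) :
    ∀ (l : List Int) (c : Int), 0 ≤ c →
      pvG player l c = max (c + (pvPrefRun player l : Int))
        (pvMaxRun (l.drop (pvPrefRun player l + 1)) player) := by
  intro l
  induction l with
  | nil =>
    intro c hc
    simp [pvG, pvPrefRun, pvMaxRun]
    omega
  | cons v rest ih =>
    intro c hc
    by_cases hv : v = player
    · rw [show pvG player (v :: rest) c = pvG player rest (c + 1) from by simp [pvG, hv],
        show pvPrefRun player (v :: rest) = pvPrefRun player rest + 1 from by
          simp [pvPrefRun, hv],
        ih (c + 1) (by omega), List.drop_succ_cons]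
      congr 1
      push_cast
      ring
    · rw [show pvG player (v :: rest) c = max c (pvG player rest 0) from by simp [pvG, hv],
        show pvPrefRun player (v :: rest) = 0 from by simp [pvPrefRun, hv]]
      have h0 : pvG player rest 0 = pvMaxRun rest player := by
        rw [ih 0 le_rfl]
        by_cases hr : rest = []
        · subst hr; simp [pvPrefRun, pvMaxRun]
        · conv_rhs => rw [pvMaxRun]
          rw [if_neg hr]
          simp
      rw [h0, List.drop_succ_cons]
      simp

theorem pvMaxRun_eq_G (player : Int) (l : List Int) : pvMaxRun l player = pvG player l 0 := by
  rw [pvG_eq_maxRun player l 0 le_rfl]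
  by_cases hr : l = []
  · subst hr; simp [pvMaxRun, pvPrefRun]
  · rw [pvMaxRun]; simp [hr]

theorem pvRange8 : PySem.List.pyRange 0 8 1 = [0, 1, 2, 3, 4, 5, 6, 7] := by decide

theorem pvCells8 (board : List Int) (width height : Int) (sr sc rs cs : Int) :
    pvCells board width height rs cs [0, 1, 2, 3, 4, 5, 6, 7] (sr - rs * 3) (sc - cs * 3)
      = [0, 1, 2, 3, 4, 5, 6, 7].map (fun i : Int =>
          pvCellAt board width height (sr + (i - 3) * rs) (sc + (i - 3) * cs)) := by
  simp only [pvCells, List.map]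
  refine List.cons_eq_cons.mpr ⟨?_, ?_⟩ <;>
    [skip; refine List.cons_eq_cons.mpr ⟨?_, ?_⟩] <;>
    [skip; skip; refine List.cons_eq_cons.mpr ⟨?_, ?_⟩] <;>
    [skip; skip; skip; refine List.cons_eq_cons.mpr ⟨?_, ?_⟩] <;>
    [skip; skip; skip; skip; refine List.cons_eq_cons.mpr ⟨?_, ?_⟩] <;>
    [skip; skip; skip; skip; skip; refine List.cons_eq_cons.mpr ⟨?_, ?_⟩] <;>
    [skip; skip; skip; skip; skip; skip; refine List.cons_eq_cons.mpr ⟨?_, ?_⟩] <;>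
    [skip; skip; skip; skip; skip; skip; skip; refine List.cons_eq_cons.mpr ⟨?_, rfl⟩] <;>
    (congr 1 <;> ring)

-- ===== VERDICT (by name: the statement is the Claim_ definition above) =====
theorem max_num_player_symbols_spec : Claim_equal_max_num_player_symbols := by
  intro sr sc rs cs player board width height _hdom _hpre
  unfold Spec_max_num_player_symbols
  unfold max_num_player_symbols max_num_player_symbols_alt
  rw [pvFoldA_eq, pvRange8, pvCells8]
  dsimp only
  rw [List.filterMap_map]
  have hcomp : ((fun ind => if ind ≠ -1 then some (PySem.List.pyGetD board ind 0) else none) ∘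
      (fun i : Int => board_xy_to_ind (sr + (i - 3) * rs) (sc + (i - 3) * cs) width height))
      = fun i : Int => pvCellAt board width height (sr + (i - 3) * rs) (sc + (i - 3) * cs) := by
    funext i; rfl
  rw [hcomp]
  have hswap : ∀ (l : List Int) (f : Int → Option Int),
      List.filterMap f l = (l.map f).filterMap id := by
    intro l f
    rw [List.filterMap_map]
    rfl
  rw [hswap]
  rw [pvFuse_eq_G player _ 0 0 le_rfl le_rfl]
  rw [pvMaxRun_eq_G]
  have h := pvG_ge player ((([0, 1, 2, 3, 4, 5, 6, 7] : List Int).map (fun i : Int =>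
      pvCellAt board width height (sr + (i - 3) * rs) (sc + (i - 3) * cs))).filterMap id) 0
  omega
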